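-- pv_equiv track=rewrite | github.com/FAKE-SURYA/dsa | 3637. Trionic Array I.py | isTrionic
-- ===== SOURCE A (Python) =====
-- from typing import List
--
-- def isTrionic(nums: List[int]) -> bool:
--     n = len(nums)
--
--
--     def is_inc(l, r):
--         for i in range(l, r):
--             if nums[i] >= nums[i + 1]:
--                 return False
--         return True
--
--
--     def is_dec(l, r):
--         for i in range(l, r):
--             if nums[i] <= nums[i + 1]:
--                 return False
--         return True
--
--
--     for p in range(1, n - 2 + 1):
--         for q in range(p + 1, n - 1):
--             if is_inc(0, p) and is_dec(p, q) and is_inc(q, n - 1):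
--                 return True
--
--     return False
-- ===== SOURCE B (Python) =====
-- from typing import List
--
--
-- def _run_up(nums: List[int], i: int) -> int:
--     n = len(nums)
--     while i < n and nums[i - 1] < nums[i]:
--         i += 1
--     return i
--
--
-- def _run_down(nums: List[int], i: int) -> int:
--     n = len(nums)
--     while i < n and nums[i - 1] > nums[i]:
--         i += 1
--     return i
--
--
-- def isTrionic(nums: List[int]) -> bool:
--     n = len(nums)
--     if n < 4:
--         return False
--     i = _run_up(nums, 1)
--     p = i - 1
--     if p == 0:
--         return False
--     i = _run_down(nums, i)
--     q = i - 1
--     if q == p: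
--         return False
--     i = _run_up(nums, i)
--     return i == n and q < n - 1
-- ===== Notes on version B (the rewrite author's own statement) =====
-- stated objective: faster
-- what changed: Replaced the quadratic search over all (p,q) split points with inner rescans by a single linear pass that walks the unique maximal increasing, decreasing, increasing runs and checks they tile the array.
import Mathlib
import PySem

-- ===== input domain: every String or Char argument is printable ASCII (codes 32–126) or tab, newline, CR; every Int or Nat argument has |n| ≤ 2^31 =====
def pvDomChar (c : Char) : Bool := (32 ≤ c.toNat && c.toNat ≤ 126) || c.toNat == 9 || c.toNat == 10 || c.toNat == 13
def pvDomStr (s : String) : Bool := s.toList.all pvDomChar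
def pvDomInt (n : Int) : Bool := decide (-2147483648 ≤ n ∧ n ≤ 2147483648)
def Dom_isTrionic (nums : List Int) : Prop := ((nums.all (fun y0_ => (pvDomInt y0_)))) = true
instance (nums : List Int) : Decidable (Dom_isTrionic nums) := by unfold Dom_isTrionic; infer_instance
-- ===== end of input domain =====

-- B replaces A's O(n^3) scan over all split pairs by one linear pass over the three monotone runs (objective: faster, asymptotic).

-- ===== PORT A =====
-- nums[i]: all indices A uses are in range, so pyGetD with default 0 is exact here
def pvGetA (nums : List Int) (i : Int) : Int := PySem.List.pyGetD nums i 0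

def pvIsInc (nums : List Int) (l r : Int) : Bool :=
  (PySem.List.pyRange l r 1).all (fun i => !(decide (pvGetA nums i ≥ pvGetA nums (i+1))))

def pvIsDec (nums : List Int) (l r : Int) : Bool :=
  (PySem.List.pyRange l r 1).all (fun i => !(decide (pvGetA nums i ≤ pvGetA nums (i+1))))

def isTrionic (nums : List Int) : Bool :=
  let n : Int := nums.length
  (PySem.List.pyRange 1 (n - 2 + 1) 1).any (fun p =>
    (PySem.List.pyRange (p + 1) (n - 1) 1).any (fun q =>
      pvIsInc nums 0 p && pvIsDec nums p q && pvIsInc nums q (n - 1)))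

-- ===== PORT B =====
def pvGetB (nums : List Int) (i : Int) : Int := PySem.List.pyGetD nums i 0

def pvRunUp (nums : List Int) (i : Int) : Int :=
  if i < (nums.length : Int) ∧ pvGetB nums (i - 1) < pvGetB nums i then
    pvRunUp nums (i + 1)
  else i
termination_by ((nums.length : Int) - i).toNat
decreasing_by omega

def pvRunDown (nums : List Int) (i : Int) : Int :=
  if i < (nums.length : Int) ∧ pvGetB nums (i - 1) > pvGetB nums i then
    pvRunDown nums (i + 1)
  else i
termination_by ((nums.length : Int) - i).toNat
decreasing_by omega

def isTrionic_alt (nums : List Int) : Bool :=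
  let n : Int := nums.length
  if n < 4 then false
  else
    let i1 := pvRunUp nums 1
    let p := i1 - 1
    if p = 0 then false
    else
      let i2 := pvRunDown nums i1
      let q := i2 - 1
      if q = p then false
      else
        let i3 := pvRunUp nums i2
        decide (i3 = n ∧ q < n - 1)

-- ===== PRECONDITION & SPEC =====
def Spec_isTrionic (nums : List Int) (out : Bool) : Prop := out = isTrionic_alt nums
instance (nums : List Int) (out : Bool) : Decidable (Spec_isTrionic nums out) := by unfold Spec_isTrionic; infer_instance

-- ===== CLAIM (what is proved, stated in full; the proofs are below) =====
def Claim_equal_isTrionic : Prop := ∀ (nums : List Int), Dom_isTrionic nums → Spec_isTrionic nums (isTrionic nums)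

-- ===== LEMMAS AND PROOFS =====

-- both getters are the same function
theorem pvGetAB (nums : List Int) (i : Int) : pvGetA nums i = pvGetB nums i := rfl

-- strict increase of adjacent pairs on [l, r)
def IncOn (nums : List Int) (l r : Int) : Prop :=
  ∀ i : Int, l ≤ i → i < r → pvGetB nums i < pvGetB nums (i + 1)

def DecOn (nums : List Int) (l r : Int) : Prop :=
  ∀ i : Int, l ≤ i → i < r → pvGetB nums i > pvGetB nums (i + 1)

theorem pvIsInc_iff (nums : List Int) (l r : Int) :
    pvIsInc nums l r = true ↔ IncOn nums l r := by
  unfold pvIsInc IncOn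
  simp [List.all_eq_true, PySem.List.mem_pyRange_one, pvGetAB]

theorem pvIsDec_iff (nums : List Int) (l r : Int) :
    pvIsDec nums l r = true ↔ DecOn nums l r := by
  unfold pvIsDec DecOn
  simp [List.all_eq_true, PySem.List.mem_pyRange_one, pvGetAB]

-- characterisation of A
theorem A_iff (nums : List Int) :
    isTrionic nums = true ↔
      ∃ p q : Int, 1 ≤ p ∧ p + 1 ≤ q ∧ q ≤ (nums.length : Int) - 2 ∧
        IncOn nums 0 p ∧ DecOn nums p q ∧ IncOn nums q ((nums.length : Int) - 1) := by
  unfold isTrionic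
  rw [List.any_eq_true]
  constructor
  · rintro ⟨p, hpmem, hp⟩
    rw [List.any_eq_true] at hp
    obtain ⟨q, hqmem, hq⟩ := hp
    rw [PySem.List.mem_pyRange_one] at hpmem hqmem
    simp only [Bool.and_eq_true] at hq
    obtain ⟨⟨h1, h2⟩, h3⟩ := hq
    exact ⟨p, q, hpmem.1, by omega, by omega,
      (pvIsInc_iff nums 0 p).mp h1, (pvIsDec_iff nums p q).mp h2,
      (pvIsInc_iff nums q ((nums.length : Int) - 1)).mp h3⟩
  · rintro ⟨p, q, hp1, hpq, hq2, h1, h2, h3⟩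
    refine ⟨p, ?_, ?_⟩
    · rw [PySem.List.mem_pyRange_one]; omega
    · rw [List.any_eq_true]
      refine ⟨q, ?_, ?_⟩
      · rw [PySem.List.mem_pyRange_one]; omega
      · simp only [Bool.and_eq_true]
        exact ⟨⟨(pvIsInc_iff nums 0 p).mpr h1, (pvIsDec_iff nums p q).mpr h2⟩,
          (pvIsInc_iff nums q ((nums.length : Int) - 1)).mpr h3⟩

-- spec of the run loops (existence)
theorem pvRunUp_spec (nums : List Int) (i : Int) (hi : i ≤ (nums.length : Int)) :
    i ≤ pvRunUp nums i ∧ pvRunUp nums i ≤ (nums.length : Int) ∧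
      (∀ k : Int, i ≤ k → k < pvRunUp nums i → pvGetB nums (k - 1) < pvGetB nums k) ∧
      (pvRunUp nums i < (nums.length : Int) →
        ¬ pvGetB nums (pvRunUp nums i - 1) < pvGetB nums (pvRunUp nums i)) := by
  generalize hm : ((nums.length : Int) - i).toNat = m
  induction m generalizing i with
  | zero =>
    rw [pvRunUp]
    have : ¬ (i < (nums.length : Int) ∧ pvGetB nums (i-1) < pvGetB nums i) := by
      intro ⟨h, _⟩; omega
    rw [if_neg this]
    refine ⟨le_refl _, hi, by omega, ?_⟩
    intro h; omega
  | succ m ih =>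
    rw [pvRunUp]
    by_cases h : i < (nums.length : Int) ∧ pvGetB nums (i-1) < pvGetB nums i
    · rw [if_pos h]
      obtain ⟨ih1, ih2, ih3, ih4⟩ := ih (i+1) (by omega) (by omega)
      refine ⟨by omega, ih2, ?_, ih4⟩
      intro k hk1 hk2
      by_cases hk : i + 1 ≤ k
      · exact ih3 k hk hk2
      · have : k = i := by omega
        subst this; exact h.2
    · rw [if_neg h]
      refine ⟨le_refl _, hi, by omega, ?_⟩
      intro hlt hcon; exact h ⟨hlt, hcon⟩

theorem pvRunDown_spec (nums : List Int) (i : Int) (hi : i ≤ (nums.length : Int)) :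
    i ≤ pvRunDown nums i ∧ pvRunDown nums i ≤ (nums.length : Int) ∧
      (∀ k : Int, i ≤ k → k < pvRunDown nums i → pvGetB nums (k - 1) > pvGetB nums k) ∧
      (pvRunDown nums i < (nums.length : Int) →
        ¬ pvGetB nums (pvRunDown nums i - 1) > pvGetB nums (pvRunDown nums i)) := by
  generalize hm : ((nums.length : Int) - i).toNat = m
  induction m generalizing i with
  | zero =>
    rw [pvRunDown]
    have : ¬ (i < (nums.length : Int) ∧ pvGetB nums (i-1) > pvGetB nums i) := by
      intro ⟨h, _⟩; omega
    rw [if_neg this]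
    refine ⟨le_refl _, hi, by omega, ?_⟩
    intro h; omega
  | succ m ih =>
    rw [pvRunDown]
    by_cases h : i < (nums.length : Int) ∧ pvGetB nums (i-1) > pvGetB nums i
    · rw [if_pos h]
      obtain ⟨ih1, ih2, ih3, ih4⟩ := ih (i+1) (by omega) (by omega)
      refine ⟨by omega, ih2, ?_, ih4⟩
      intro k hk1 hk2
      by_cases hk : i + 1 ≤ k
      · exact ih3 k hk hk2
      · have : k = i := by omega
        subst this; exact h.2
    · rw [if_neg h]
      refine ⟨le_refl _, hi, by omega, ?_⟩
      intro hlt hcon; exact h ⟨hlt, hcon⟩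

-- uniqueness: any point with the stop properties is the loop's result
theorem pvRunUp_eq (nums : List Int) (i j : Int) (h1 : i ≤ j) (h2 : j ≤ (nums.length : Int))
    (h3 : ∀ k : Int, i ≤ k → k < j → pvGetB nums (k - 1) < pvGetB nums k)
    (h4 : j = (nums.length : Int) ∨ ¬ pvGetB nums (j - 1) < pvGetB nums j) :
    pvRunUp nums i = j := by
  generalize hm : ((nums.length : Int) - i).toNat = m
  induction m generalizing i with
  | zero =>
    have hij : i = j := by omega
    rw [pvRunUp, if_neg]; exact hij
    intro ⟨h, _⟩; omega
  | succ m ih =>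
    by_cases hcase : i < j
    · rw [pvRunUp, if_pos ⟨by omega, h3 i (le_refl _) hcase⟩]
      exact ih (i+1) (by omega) (fun k hk1 hk2 => h3 k (by omega) hk2) (by omega)
    · have hij : i = j := by omega
      subst hij
      rw [pvRunUp, if_neg]
      intro ⟨ha, hb⟩
      rcases h4 with h4 | h4
      · omega
      · exact h4 hb

theorem pvRunDown_eq (nums : List Int) (i j : Int) (h1 : i ≤ j) (h2 : j ≤ (nums.length : Int))
    (h3 : ∀ k : Int, i ≤ k → k < j → pvGetB nums (k - 1) > pvGetB nums k)
    (h4 : j = (nums.length : Int) ∨ ¬ pvGetB nums (j - 1) > pvGetB nums j) :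
    pvRunDown nums i = j := by
  generalize hm : ((nums.length : Int) - i).toNat = m
  induction m generalizing i with
  | zero =>
    have hij : i = j := by omega
    rw [pvRunDown, if_neg]; exact hij
    intro ⟨h, _⟩; omega
  | succ m ih =>
    by_cases hcase : i < j
    · rw [pvRunDown, if_pos ⟨by omega, h3 i (le_refl _) hcase⟩]
      exact ih (i+1) (by omega) (fun k hk1 hk2 => h3 k (by omega) hk2) (by omega)
    · have hij : i = j := by omega
      subst hij
      rw [pvRunDown, if_neg]
      intro ⟨ha, hb⟩
      rcases h4 with h4 | h4
      · omega
      · exact h4 hb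

-- characterisation of B
theorem B_iff (nums : List Int) :
    isTrionic_alt nums = true ↔
      ∃ p q : Int, 1 ≤ p ∧ p + 1 ≤ q ∧ q ≤ (nums.length : Int) - 2 ∧
        IncOn nums 0 p ∧ DecOn nums p q ∧ IncOn nums q ((nums.length : Int) - 1) := by
  set n : Int := (nums.length : Int) with hn
  have hn0 : 0 ≤ n := by positivity
  unfold isTrionic_alt
  constructor
  · -- B true → existential
    intro hB
    simp only [← hn] at hB
    by_cases h4 : n < 4
    · rw [if_pos h4] at hB; exact absurd hB (by simp)
    rw [if_neg h4] at hB
    obtain ⟨s1, s2, s3, s4⟩ := pvRunUp_spec nums 1 (by omega)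
    set i1 := pvRunUp nums 1 with hi1
    by_cases hp0 : i1 - 1 = 0
    · rw [if_pos hp0] at hB; exact absurd hB (by simp)
    rw [if_neg hp0] at hB
    obtain ⟨t1, t2, t3, t4⟩ := pvRunDown_spec nums i1 s2
    set i2 := pvRunDown nums i1 with hi2
    by_cases hq : i2 - 1 = i1 - 1
    · rw [if_pos hq] at hB; exact absurd hB (by simp)
    rw [if_neg hq] at hB
    obtain ⟨u1, u2, u3, _⟩ := pvRunUp_spec nums i2 t2
    set i3 := pvRunUp nums i2 with hi3
    simp only [decide_eq_true_eq] at hB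
    obtain ⟨hi3n, hqlt⟩ := hB
    refine ⟨i1 - 1, i2 - 1, by omega, by omega, by omega, ?_, ?_, ?_⟩
    · intro i ha hb
      have := s3 (i+1) (by omega) (by omega)
      simpa using this
    · intro i ha hb
      have := t3 (i+1) (by omega) (by omega)
      simpa using this
    · intro i ha hb
      have := u3 (i+1) (by omega) (by omega)
      simpa using this
  · -- existential → B true
    rintro ⟨p, q, hp1, hpq, hq2, hinc1, hdec, hinc2⟩
    have h4 : ¬ n < 4 := by omega
    have hup1 : pvRunUp nums 1 = p + 1 := by
      apply pvRunUp_eq nums 1 (p+1) (by omega) (by omega)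
      · intro k hk1 hk2
        have := hinc1 (k-1) (by omega) (by omega)
        simpa using this
      · right
        have := hdec p (le_refl _) (by omega)
        simp only [show p + 1 - 1 = p by ring]
        omega
    have hdown : pvRunDown nums (p+1) = q + 1 := by
      apply pvRunDown_eq nums (p+1) (q+1) (by omega) (by omega)
      · intro k hk1 hk2
        have := hdec (k-1) (by omega) (by omega)
        simpa using this
      · right
        have := hinc2 q (le_refl _) (by omega)
        simp only [show q + 1 - 1 = q by ring]
        omega
    have hup2 : pvRunUp nums (q+1) = n := by
      apply pvRunUp_eq nums (q+1) n (by omega) (le_refl _)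
      · intro k hk1 hk2
        have := hinc2 (k-1) (by omega) (by omega)
        simpa using this
      · left; rfl
    simp only [← hn]
    rw [if_neg h4, hup1]
    rw [if_neg (show ¬ (p + 1 - 1 = 0) by omega)]
    rw [hdown]
    rw [if_neg (show ¬ (q + 1 - 1 = p + 1 - 1) by omega)]
    rw [hup2]
    simp only [decide_eq_true_eq]
    exact ⟨by trivial, by omega⟩

-- ===== VERDICT (by name: the statement is the Claim_ definition above) =====
theorem isTrionic_spec : Claim_equal_isTrionic := by
  intro nums _
  unfold Spec_isTrionic
  by_cases h : isTrionic_alt nums = true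
  · rw [h, (A_iff nums).mpr ((B_iff nums).mp h)]
  · have hA : ¬ isTrionic nums = true := fun hc => h ((B_iff nums).mpr ((A_iff nums).mp hc))
    simp only [Bool.not_eq_true] at h hA
    rw [h, hA]
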